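-- pv_equiv track=rewrite | github.com/CrystalPeakSecurity/jcc | examples/doom/tools/analyze_jca_detailed.py | find_conversion_chains
-- ===== SOURCE A (Python) =====
-- def find_conversion_chains(instructions):
--     """Find sequences of type conversions that could be optimized."""
--     chains = []
--     i = 0
--
--     while i < len(instructions) - 1:
--         chain = []
--         curr = instructions[i].split()[0]
--
--         if curr in ["s2i", "i2s", "s2b", "b2s", "i2b", "b2i"]:
--             chain.append((i, curr))
--             j = i + 1
--
--             # Look for more conversions
--             while j < len(instructions):
--                 next_instr = instructions[j].split()[0]
--                 if next_instr in ["s2i", "i2s", "s2b", "b2s", "i2b", "b2i"]: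
--                     chain.append((j, next_instr))
--                     j += 1
--                 elif next_instr in ["dup", "pop", "swap"]:
--                     # Include stack ops in chain
--                     chain.append((j, next_instr))
--                     j += 1
--                 else:
--                     break
--
--             if len(chain) > 1:
--                 chains.append(chain)
--                 i = j
--             else:
--                 i += 1
--         else:
--             i += 1
--
--     return chains
-- ===== SOURCE B (Python) =====
-- def find_conversion_chains(instructions):
--     """Find sequences of type conversions that could be optimized.
--
--     Single flat pass with a running chain accumulator instead of nested
--     while loops with manual index jumping; blank/whitespace-only lines
--     simply break a chain instead of raising."""
--     CONV = ("s2i", "i2s", "s2b", "b2s", "i2b", "b2i")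
--     STACK = ("dup", "pop", "swap")
--     chains = []
--     chain = []
--     for idx, instr in enumerate(instructions):
--         parts = instr.split()
--         op = parts[0] if parts else ""
--         if op in CONV:
--             chain.append((idx, op))
--         elif op in STACK and chain:
--             chain.append((idx, op))
--         else:
--             if len(chain) > 1:
--                 chains.append(chain)
--             chain = []
--     if len(chain) > 1:
--         chains.append(chain)
--     return chains
-- ===== Notes on version B (the rewrite author's own statement) =====
-- stated objective: simpler
-- what changed: Replaced the nested while loops with manual index jumping by a single flat pass over enumerate(instructions) that maintains a running chain accumulator, flushing it when a run breaks and once after the loop.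
import Mathlib
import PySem

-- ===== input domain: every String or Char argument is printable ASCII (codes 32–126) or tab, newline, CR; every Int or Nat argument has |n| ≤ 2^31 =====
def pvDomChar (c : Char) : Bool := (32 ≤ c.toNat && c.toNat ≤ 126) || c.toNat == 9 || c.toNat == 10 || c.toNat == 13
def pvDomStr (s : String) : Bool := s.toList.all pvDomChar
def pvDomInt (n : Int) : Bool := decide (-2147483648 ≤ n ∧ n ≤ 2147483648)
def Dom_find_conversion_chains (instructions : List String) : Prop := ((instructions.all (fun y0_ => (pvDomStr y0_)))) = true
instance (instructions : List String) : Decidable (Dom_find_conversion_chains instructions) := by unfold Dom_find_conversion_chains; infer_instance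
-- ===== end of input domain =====

-- B replaces A's nested while loops and manual index jumps by one flat pass with a
-- running chain accumulator (objective: simpler).


-- ===== PORT A =====
def pvConvOps : List String := ["s2i", "i2s", "s2b", "b2s", "i2b", "b2i"]
def pvStackOps : List String := ["dup", "pop", "swap"]

-- inner `while j < len(instructions)` loop of A: extends `chain` from index j,
-- returns (chain, j) at the break / bounds exit.  `fuel` only totalises the
-- loop (any fuel ≥ len - j runs it to completion; callers pass len).
-- `instr.split()[0]` is ported as `(split₀ …).headD ""`: Pre_ guarantees every
-- element A actually splits has a nonempty word list (Python raises IndexError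
-- otherwise), so headD is exact there.
def pvInnerA (instructions : List String) (fuel j : Nat) (chain : List (Int × String)) :
    List (Int × String) × Nat :=
  match fuel with
  | 0 => (chain, j)
  | fuel + 1 =>
    if h : j < instructions.length then
      -- next_instr = instructions[j].split()[0] (inlined)
      if (PySem.Str.split₀ instructions[j]).headD "" ∈ pvConvOps then
        pvInnerA instructions fuel (j + 1)
          (chain ++ [((j : Int), (PySem.Str.split₀ instructions[j]).headD "")])
      else if (PySem.Str.split₀ instructions[j]).headD "" ∈ pvStackOps then
        pvInnerA instructions fuel (j + 1)
          (chain ++ [((j : Int), (PySem.Str.split₀ instructions[j]).headD "")])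
      else (chain, j)
    else (chain, j)

-- outer `while i < len(instructions) - 1` loop of A (i ≥ 0, so `i < len - 1 ↔ i + 1 < len`);
-- `fuel` only totalises the loop (i strictly increases, so any fuel ≥ len - i suffices)
def pvOuterA (instructions : List String) (fuel i : Nat)
    (chains : List (List (Int × String))) : List (List (Int × String)) :=
  match fuel with
  | 0 => chains
  | fuel + 1 =>
    if _h : i + 1 < instructions.length then
      -- curr = instructions[i].split()[0] (inlined)
      if (PySem.Str.split₀ instructions[i]!).headD "" ∈ pvConvOps then
        let r := pvInnerA instructions instructions.length (i + 1)
          [((i : Int), (PySem.Str.split₀ instructions[i]!).headD "")]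
        if r.1.length > 1 then pvOuterA instructions fuel r.2 (chains ++ [r.1])
        else pvOuterA instructions fuel (i + 1) chains
      else pvOuterA instructions fuel (i + 1) chains
    else chains

def find_conversion_chains (instructions : List String) : List (List (Int × String)) :=
  pvOuterA instructions instructions.length 0 []

-- ===== PORT B =====
def pvConvB : List String := ["s2i", "i2s", "s2b", "b2s", "i2b", "b2i"]
def pvStackB : List String := ["dup", "pop", "swap"]

-- loop body of Source B: state = (chains, running chain), input = (idx, instr);
-- `op = parts[0] if parts else ""` is exactly `(split₀ instr).headD ""`
def pvStepB (st : List (List (Int × String)) × List (Int × String)) (p : Int × String) :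
    List (List (Int × String)) × List (Int × String) :=
  if (PySem.Str.split₀ p.2).headD "" ∈ pvConvB then
    (st.1, st.2 ++ [(p.1, (PySem.Str.split₀ p.2).headD "")])
  else if (PySem.Str.split₀ p.2).headD "" ∈ pvStackB ∧ st.2 ≠ [] then
    (st.1, st.2 ++ [(p.1, (PySem.Str.split₀ p.2).headD "")])
  else (if st.2.length > 1 then st.1 ++ [st.2] else st.1, [])

def find_conversion_chains_alt (instructions : List String) : List (List (Int × String)) :=
  let st := (PySem.List.enumerate instructions).foldl pvStepB ([], [])
  if st.2.length > 1 then st.1 ++ [st.2] else st.1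

-- ===== PRECONDITION & SPEC =====
-- token of an instruction as B computes it (first word, or "" if none)
def pvTok (s : String) : String := (PySem.Str.split₀ s).headD ""
-- A's inner loop splits the LAST element iff a chain is active when it gets there:
-- some conversion token at i < len-1 followed only by conversion/stack tokens up to len-2
def pvReachedLast (xs : List String) : Bool :=
  (List.range (xs.length - 1)).any fun i =>
    pvConvOps.contains (pvTok (xs.getD i "")) &&
    ((List.range (xs.length - 1)).all fun m =>
      decide (m ≤ i) || pvConvOps.contains (pvTok (xs.getD m "")) ||
        pvStackOps.contains (pvTok (xs.getD m "")))

-- Pre_ excludes exactly the inputs on which A raises IndexError from `.split()[0]`: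
-- a whitespace-only element before the last index (A splits every such index), or a
-- whitespace-only last element that A reaches through an active chain.
def Pre_find_conversion_chains (instructions : List String) : Prop :=
  (∀ k, k < instructions.length - 1 → PySem.Str.split₀ (instructions.getD k "") ≠ []) ∧
  (instructions ≠ [] →
    PySem.Str.split₀ (instructions.getD (instructions.length - 1) "") = [] →
    pvReachedLast instructions = false)
instance (instructions : List String) : Decidable (Pre_find_conversion_chains instructions) := by
  unfold Pre_find_conversion_chains; infer_instance

def pvWitness_find_conversion_chains : List String := ["s2i", "dup", "add 1"]

def Spec_find_conversion_chains (instructions : List String) (out : List (List (Int × String))) : Prop := out = find_conversion_chains_alt instructions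
instance (instructions : List String) (out : List (List (Int × String))) : Decidable (Spec_find_conversion_chains instructions out) := by unfold Spec_find_conversion_chains; infer_instance

-- ===== CLAIM (what is proved, stated in full; the proofs are below) =====
def Claim_equal_find_conversion_chains : Prop := ∀ (instructions : List String), Dom_find_conversion_chains instructions → Pre_find_conversion_chains instructions → Spec_find_conversion_chains instructions (find_conversion_chains instructions)

-- ===== LEMMAS AND PROOFS =====

lemma pv_drop_enum (xs : List String) (i : Nat) (h : i < xs.length) :
    (PySem.List.enumerate xs).drop i
      = ((i : Int), xs[i]) :: (PySem.List.enumerate xs).drop (i + 1) := by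
  have hl : i < (PySem.List.enumerate xs).length := by
    simpa [PySem.List.length_enumerate] using h
  rw [List.drop_eq_getElem_cons hl]
  simp [PySem.List.getElem_enumerate]

lemma pv_drop_enum_nil (xs : List String) (i : Nat) (h : xs.length ≤ i) :
    (PySem.List.enumerate xs).drop i = [] := by
  apply List.drop_eq_nil_of_le
  simpa [PySem.List.length_enumerate] using h

-- the inner loop moves forward
lemma pvInnerA_ge (xs : List String) (fuel : Nat) : ∀ (j : Nat) (chain : List (Int × String)),
    j ≤ (pvInnerA xs fuel j chain).2 := by
  induction fuel with
  | zero => intro j chain; simp [pvInnerA]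
  | succ fuel ih =>
      intro j chain
      rw [pvInnerA]
      split
      · split
        · exact le_trans (by omega) (ih (j + 1) _)
        · split
          · exact le_trans (by omega) (ih (j + 1) _)
          · simp
      · simp

-- chain length never shrinks
lemma pvInnerA_len_mono (xs : List String) (fuel : Nat) :
    ∀ (j : Nat) (chain : List (Int × String)),
    chain.length ≤ (pvInnerA xs fuel j chain).1.length := by
  induction fuel with
  | zero => intro j chain; simp [pvInnerA]
  | succ fuel ih =>
      intro j chain
      rw [pvInnerA]
      split
      · split
        · exact le_trans (by simp) (ih (j + 1) _)
        · split
          · exact le_trans (by simp) (ih (j + 1) _)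
          · simp
      · simp

-- if the chain did not grow, the inner loop returned immediately
lemma pvInnerA_of_len_eq (xs : List String) (fuel j : Nat) (chain : List (Int × String))
    (h : (pvInnerA xs fuel j chain).1.length ≤ chain.length) :
    pvInnerA xs fuel j chain = (chain, j) := by
  cases fuel with
  | zero => rfl
  | succ fuel =>
      rw [pvInnerA] at h ⊢
      split at h
      · rename_i hj
        split at h
        · exfalso
          have := pvInnerA_len_mono xs fuel (j + 1)
            (chain ++ [((j : Int), (PySem.Str.split₀ xs[j]).headD "")])
          simp only [List.length_append, List.length_cons, List.length_nil] at this
          omega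
        · split at h
          · exfalso
            have := pvInnerA_len_mono xs fuel (j + 1)
              (chain ++ [((j : Int), (PySem.Str.split₀ xs[j]).headD "")])
            simp only [List.length_append, List.length_cons, List.length_nil] at this
            omega
          · simp_all
      · simp_all

-- with enough fuel, at an in-range exit index the token starts no chain and is no stack op
lemma pvInnerA_break (xs : List String) (fuel : Nat) :
    ∀ (j : Nat) (chain : List (Int × String)), xs.length - j ≤ fuel →
    ∀ h : (pvInnerA xs fuel j chain).2 < xs.length,
      (PySem.Str.split₀ xs[(pvInnerA xs fuel j chain).2]).headD "" ∉ pvConvOps ∧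
      (PySem.Str.split₀ xs[(pvInnerA xs fuel j chain).2]).headD "" ∉ pvStackOps := by
  induction fuel with
  | zero =>
      intro j chain hf h'
      simp only [pvInnerA] at h'
      omega
  | succ fuel ih =>
      intro j chain hf
      rw [pvInnerA]
      split
      · split
        · exact ih (j + 1) _ (by omega)
        · split
          · exact ih (j + 1) _ (by omega)
          · rename_i hnc hns
            intro _; exact ⟨hnc, hns⟩
      · rename_i hj
        intro h'; exact absurd h' hj

-- B's fold tracks A's inner loop step for step while the chain is nonempty
lemma pv_inner_foldl (xs : List String) (fuel : Nat) :
    ∀ (j : Nat) (chain : List (Int × String)) (acc : List (List (Int × String))),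
    chain ≠ [] →
    ((PySem.List.enumerate xs).drop j).foldl pvStepB (acc, chain)
      = ((PySem.List.enumerate xs).drop (pvInnerA xs fuel j chain).2).foldl pvStepB
          (acc, (pvInnerA xs fuel j chain).1) := by
  induction fuel with
  | zero => intro j chain acc hc; rfl
  | succ fuel ih =>
      intro j chain acc hc
      rw [pvInnerA]
      split
      · rename_i hj
        split
        · rename_i ht
          rw [pv_drop_enum xs j hj, List.foldl_cons]
          have hstep : pvStepB (acc, chain) ((j : Int), xs[j])
              = (acc, chain ++ [((j : Int), (PySem.Str.split₀ xs[j]).headD "")]) := by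
            simp only [pvStepB, pvConvB, pvStackB]
            simp only [pvConvOps] at ht
            simp_all
          rw [hstep]
          exact ih (j + 1) _ acc (by simp)
        · split
          · rename_i hnc hs
            rw [pv_drop_enum xs j hj, List.foldl_cons]
            have hstep : pvStepB (acc, chain) ((j : Int), xs[j])
                = (acc, chain ++ [((j : Int), (PySem.Str.split₀ xs[j]).headD "")]) := by
              simp only [pvStepB, pvConvB, pvStackB]
              simp only [pvConvOps] at hnc
              simp only [pvStackOps] at hs
              simp_all
            rw [hstep]
            exact ih (j + 1) _ acc (by simp)
          · rfl
      · rfl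

-- A's outer loop returns its accumulator once fewer than two instructions remain
lemma pvOuterA_stop (xs : List String) (f m : Nat) (acc : List (List (Int × String)))
    (hm : ¬ m + 1 < xs.length) : pvOuterA xs f m acc = acc := by
  cases f with
  | zero => rfl
  | succ f => rw [pvOuterA]; simp [hm]

-- one outer step past an instruction whose token starts no chain
lemma pvOuterA_skip (xs : List String) (f m : Nat) (acc : List (List (Int × String)))
    (hm : m < xs.length)
    (hnc : (PySem.Str.split₀ xs[m]).headD "" ∉ pvConvOps) :
    pvOuterA xs (f + 1) m acc = pvOuterA xs f (m + 1) acc := by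
  rw [pvOuterA]
  by_cases h : m + 1 < xs.length
  · simp only [dif_pos h]
    rw [getElem!_pos xs m hm, if_neg hnc]
  · simp only [dif_neg h]
    exact (pvOuterA_stop xs f (m + 1) acc (by omega)).symm

-- main invariant: finishing B's fold over the suffix from i with an empty chain
-- equals A's outer loop started at i, for any sufficient fuel
lemma pv_main (xs : List String) :
    ∀ (k i f : Nat) (acc : List (List (Int × String))),
      xs.length - i ≤ k → xs.length - i ≤ f →
      (let st := ((PySem.List.enumerate xs).drop i).foldl pvStepB (acc, []);
       if st.2.length > 1 then st.1 ++ [st.2] else st.1) = pvOuterA xs f i acc := by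
  intro k
  induction k with
  | zero =>
      intro i f acc hk hf
      have hge : xs.length ≤ i := by omega
      rw [pv_drop_enum_nil xs i hge, pvOuterA_stop xs f i acc (by omega)]
      simp
  | succ k ih =>
      intro i f acc hk hf
      by_cases hi1 : i + 1 < xs.length
      · have hi : i < xs.length := by omega
        obtain ⟨g, rfl⟩ : ∃ g, f = g + 1 := ⟨f - 1, by omega⟩
        rw [pvOuterA]; simp only [dif_pos hi1]
        rw [getElem!_pos xs i hi]
        rw [pv_drop_enum xs i hi]
        by_cases hco : (PySem.Str.split₀ xs[i]).headD "" ∈ pvConvOps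
        · -- conversion op: first B step starts the chain
          simp only [if_pos hco]
          have hstep : pvStepB (acc, []) ((i : Int), xs[i])
              = (acc, [((i : Int), (PySem.Str.split₀ xs[i]).headD "")]) := by
            simp only [pvStepB, pvConvB]
            simp only [pvConvOps] at hco
            simp_all
          rw [List.foldl_cons, hstep,
              pv_inner_foldl xs xs.length (i + 1)
                [((i : Int), (PySem.Str.split₀ xs[i]).headD "")] acc (by simp)]
          set r := pvInnerA xs xs.length (i + 1)
            [((i : Int), (PySem.Str.split₀ xs[i]).headD "")] with hr
          have hge : i + 1 ≤ r.2 := pvInnerA_ge xs xs.length (i + 1) _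
          by_cases hlen : r.1.length > 1
          · simp only [if_pos hlen]
            by_cases hrin : r.2 < xs.length
            · -- breaking token flushes the chain in B, and A skips it too
              obtain ⟨hnc, hns⟩ := pvInnerA_break xs xs.length (i + 1)
                [((i : Int), (PySem.Str.split₀ xs[i]).headD "")] (by omega) hrin
              rw [pv_drop_enum xs r.2 hrin, List.foldl_cons]
              have hstep2 : pvStepB (acc, r.1) ((r.2 : Int), xs[r.2]) = (acc ++ [r.1], []) := by
                simp only [pvStepB, pvConvB, pvStackB]
                simp only [pvConvOps] at hnc
                simp only [pvStackOps] at hns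
                simp_all
              rw [hstep2]
              obtain ⟨g', rfl⟩ : ∃ g', g = g' + 1 := ⟨g - 1, by omega⟩
              rw [pvOuterA_skip xs g' r.2 (acc ++ [r.1]) hrin hnc]
              exact ih (r.2 + 1) g' (acc ++ [r.1]) (by omega) (by omega)
            · -- inner loop ran off the end: final flush matches A
              rw [pv_drop_enum_nil xs r.2 (by omega)]
              simp only [List.foldl_nil, if_pos hlen]
              exact (pvOuterA_stop xs g r.2 (acc ++ [r.1]) (by omega)).symm
          · -- chain stayed length 1: the inner loop returned at once
            have hr1 : r = ([((i : Int), (PySem.Str.split₀ xs[i]).headD "")], i + 1) := by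
              rw [hr]
              apply pvInnerA_of_len_eq
              have := pvInnerA_len_mono xs xs.length (i + 1)
                [((i : Int), (PySem.Str.split₀ xs[i]).headD "")]
              rw [← hr] at this ⊢
              simp at this ⊢
              omega
            obtain ⟨hnc, hns⟩ := by
              have hb := pvInnerA_break xs xs.length (i + 1)
                [((i : Int), (PySem.Str.split₀ xs[i]).headD "")] (by omega)
              rw [← hr, hr1] at hb
              exact hb (by simpa using hi1)
            rw [hr1]
            rw [pv_drop_enum xs (i + 1) hi1, List.foldl_cons]
            have hstep2 : pvStepB (acc, [((i : Int), (PySem.Str.split₀ xs[i]).headD "")])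
                (((i + 1 : Nat) : Int), xs[i + 1]) = (acc, []) := by
              simp only [pvStepB, pvConvB, pvStackB]
              simp only [pvConvOps] at hnc
              simp only [pvStackOps] at hns
              simp_all
            rw [hstep2]
            obtain ⟨g', rfl⟩ : ∃ g', g = g' + 1 := ⟨g - 1, by omega⟩
            rw [pvOuterA_skip xs g' (i + 1) acc hi1 hnc]
            exact ih (i + 2) g' acc (by omega) (by omega)
        · -- not a conversion op: both sides just move on
          simp only [if_neg hco]
          have hstep : pvStepB (acc, []) ((i : Int), xs[i]) = (acc, []) := by
            simp only [pvStepB, pvConvB]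
            simp only [pvConvOps] at hco
            simp_all
          rw [List.foldl_cons, hstep]
          exact ih (i + 1) g acc (by omega) (by omega)
      · -- at most one element left: A stops; B's last step cannot build a chain of length > 1
        rw [pvOuterA_stop xs f i acc hi1]
        by_cases hi : i < xs.length
        · rw [pv_drop_enum xs i hi, pv_drop_enum_nil xs (i + 1) (by omega)]
          simp only [List.foldl_cons, List.foldl_nil]
          simp only [pvStepB]
          split
          · simp
          · split
            · simp_all
            · simp
        · rw [pv_drop_enum_nil xs i (by omega)]; simp

-- ===== VERDICT (by name: the statement is the Claim_ definition above) =====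
theorem find_conversion_chains_spec : Claim_equal_find_conversion_chains := by
  intro instructions _ _
  unfold Spec_find_conversion_chains find_conversion_chains find_conversion_chains_alt
  have := pv_main instructions instructions.length 0 instructions.length [] (by omega) (by omega)
  simpa using this.symm
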